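-- pv_equiv track=rewrite | github.com/0otico/EP_grafos | grafos2.py | deledge
-- ===== SOURCE A (Python) =====
-- def deledge(g,x,y): #apaga arestas do grafo
--     if x!=y: #não pode acrescentar uma aresta para o próprio vértice
--         i=0
--         f=0
--         Found=False
--         Found2=False
--         while ((not Found)) and i<len(g[1]):  #verificar que existe no grafo
--             Found= (g[1][i]==(x,y))
--             i+=1
--         while ((not Found2)) and f<len(g[1]): #verificar que existe no grafo a aresta correspondente para o sentido oposto
--             Found2 = g[1][f]==(y,x)
--             f=f+1
--         if not((Found) and (Found2)): #se não estiverem no grafo retornar o grafo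
--             return g
--         else:   #se estiverem no grafo temos dois casos
--             if i<f:
--                 g=[g[0],g[1][:i-1]+g[1][i:f-1]+g[1][f:]] #apagar as arestas
--                 return g
--             else:
--                 g=[g[0],g[1][:f-1]+g[1][f:i-1]+g[1][i:]] #apagar as arestas
--                 return g
--     else:
--         return g
-- ===== SOURCE B (Python) =====
-- def deledge(g, x, y):
--     if x == y:
--         return g
--     edges = g[1]
--     if (x, y) not in edges or (y, x) not in edges:
--         return g
--     new = list(edges)
--     new.remove((x, y))
--     new.remove((y, x))
--     return [g[0], new]
-- ===== Notes on version B (the rewrite author's own statement) =====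
-- stated objective: simpler
-- what changed: Replaces A's two index-tracking while-loops plus the i<f/f<i three-slice concatenation with a membership test followed by two first-occurrence remove() calls on a copy of the edge list.
import Mathlib
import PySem

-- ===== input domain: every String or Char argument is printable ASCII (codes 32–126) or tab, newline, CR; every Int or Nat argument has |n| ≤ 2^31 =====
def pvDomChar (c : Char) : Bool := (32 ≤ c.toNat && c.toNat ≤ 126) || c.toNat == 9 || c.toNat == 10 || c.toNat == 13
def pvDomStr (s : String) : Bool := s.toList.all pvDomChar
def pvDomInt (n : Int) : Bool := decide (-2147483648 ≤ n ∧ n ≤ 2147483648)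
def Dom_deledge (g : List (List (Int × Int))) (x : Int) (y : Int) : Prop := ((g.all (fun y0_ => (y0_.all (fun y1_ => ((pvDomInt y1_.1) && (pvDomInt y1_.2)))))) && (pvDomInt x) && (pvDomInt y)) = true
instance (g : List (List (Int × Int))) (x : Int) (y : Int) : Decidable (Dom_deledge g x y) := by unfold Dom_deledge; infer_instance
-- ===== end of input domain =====

-- B replaces A's two index-tracking while-loops and slice-concatenation case analysis with a
-- membership test plus two first-occurrence remove() calls on a copy of the edge list (simpler; not claimed faster).

-- ===== PORT A =====
-- while-loop of A: scan for target t from index i with flag `found`; returns (Found, i) as A leaves them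
def deledgeLoop (e : List (Int × Int)) (t : Int × Int) (found : Bool) (i : Nat) :
    Bool × Nat :=
  if h : found = false ∧ i < e.length then
    deledgeLoop e t (decide (e[i] = t)) (i + 1)
  else (found, i)
termination_by e.length - i
decreasing_by omega

def deledge (g : List (List (Int × Int))) (x : Int) (y : Int) : List (List (Int × Int)) :=
  if x ≠ y then
    let e := (PySem.List.pyGet? g 1).getD []   -- g[1] (Pre_ guarantees it exists)
    let r1 := deledgeLoop e (x, y) false 0     -- first while: Found, i
    let r2 := deledgeLoop e (y, x) false 0     -- second while: Found2, f
    if ¬ (r1.1 ∧ r2.1) then g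
    else
      let i : Int := r1.2
      let f : Int := r2.2
      if i < f then
        [(PySem.List.pyGet? g 0).getD [],
          PySem.List.slice e none (some (i - 1)) ++ PySem.List.slice e (some i) (some (f - 1)) ++ PySem.List.slice e (some f) none]
      else
        [(PySem.List.pyGet? g 0).getD [],
          PySem.List.slice e none (some (f - 1)) ++ PySem.List.slice e (some f) (some (i - 1)) ++ PySem.List.slice e (some i) none]
  else g

-- ===== PORT B =====
def deledge_alt (g : List (List (Int × Int))) (x : Int) (y : Int) : List (List (Int × Int)) :=
  if x = y then g
  else
    let e := (PySem.List.pyGet? g 1).getD []   -- g[1] (Pre_ guarantees it exists)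
    if (x, y) ∈ e ∧ (y, x) ∈ e then
      let n1 := (PySem.List.remove? e (x, y)).getD e
      let n2 := (PySem.List.remove? n1 (y, x)).getD n1
      [(PySem.List.pyGet? g 0).getD [], n2]
    else g

-- ===== PRECONDITION & SPEC =====
-- Pre_ excludes only inputs where A raises: with x ≠ y, A evaluates g[1], an IndexError when g has fewer than 2 rows.
def Pre_deledge (g : List (List (Int × Int))) (x : Int) (y : Int) : Prop :=
  x = y ∨ 2 ≤ g.length
instance (g : List (List (Int × Int))) (x : Int) (y : Int) : Decidable (Pre_deledge g x y) := by
  unfold Pre_deledge; infer_instance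
def pvWitness_deledge : (List (List (Int × Int))) × Int × Int :=
  ([[(1, 1)], [(1, 2), (3, 3), (2, 1)]], 1, 2)

def Spec_deledge (g : List (List (Int × Int))) (x : Int) (y : Int) (out : List (List (Int × Int))) : Prop := out = deledge_alt g x y
instance (g : List (List (Int × Int))) (x : Int) (y : Int) (out : List (List (Int × Int))) : Decidable (Spec_deledge g x y out) := by unfold Spec_deledge; infer_instance

-- ===== CLAIM (what is proved, stated in full; the proofs are below) =====
def Claim_equal_deledge : Prop := ∀ (g : List (List (Int × Int))) (x : Int) (y : Int), Dom_deledge g x y → Pre_deledge g x y → Spec_deledge g x y (deledge g x y)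


-- ===== LEMMAS AND PROOFS =====

theorem deledgeLoop_true (e : List (Int × Int)) (t : Int × Int) (i : Nat) :
    deledgeLoop e t true i = (true, i) := by
  rw [deledgeLoop]; simp

theorem deledgeLoop_spec (e : List (Int × Int)) (t : Int × Int) :
    ∀ i : Nat, i ≤ e.length →
      deledgeLoop e t false i =
        if t ∈ e.drop i then (true, i + (e.drop i).idxOf t + 1) else (false, e.length) := by
  have key : ∀ n i, i ≤ e.length → e.length - i = n →
      deledgeLoop e t false i =
        if t ∈ e.drop i then (true, i + (e.drop i).idxOf t + 1) else (false, e.length) := by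
    intro n
    induction n with
    | zero =>
      intro i hi hn
      have : i = e.length := by omega
      subst this
      rw [deledgeLoop]; simp
    | succ n ih =>
      intro i hi hn
      have hlt : i < e.length := by omega
      rw [deledgeLoop]
      rw [dif_pos ⟨rfl, hlt⟩]
      have hdrop : e.drop i = e[i] :: e.drop (i + 1) := List.drop_eq_getElem_cons hlt
      by_cases ht : e[i] = t
      · simp only [ht, decide_true, deledgeLoop_true]
        rw [hdrop, ht]
        simp
      · simp only [ht, decide_false]
        rw [ih (i + 1) (by omega) (by omega)]
        by_cases hmem : t ∈ e.drop (i + 1)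
        · rw [if_pos hmem, if_pos (hdrop ▸ List.mem_cons_of_mem _ hmem), hdrop,
            List.idxOf_cons_ne _ ht]
          simp; omega
        · rw [if_neg hmem, if_neg (fun h => by
            rcases List.mem_cons.mp (hdrop ▸ h) with h1 | h1
            · exact ht h1.symm
            · exact hmem h1)]
  intro i hi; exact key (e.length - i) i hi rfl

theorem erase_erase_eq (a b : Int × Int) (hab : a ≠ b) :
    ∀ e : List (Int × Int), b ∈ e → e.idxOf a < e.idxOf b →
    (e.erase a).erase b =
      e.take (e.idxOf a) ++ (e.drop (e.idxOf a + 1)).take (e.idxOf b - (e.idxOf a + 1))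
        ++ e.drop (e.idxOf b + 1) := by
  intro e
  induction e with
  | nil => intro hb; cases hb
  | cons c e' ih =>
    intro hb hpq
    by_cases hca : c = a
    · subst hca
      have hcb : c ≠ b := hab
      have hb' : b ∈ e' := by
        rcases List.mem_cons.mp hb with h | h
        · exact absurd h.symm hcb
        · exact h
      rw [List.idxOf_cons_self, List.idxOf_cons_ne _ hcb, List.erase_cons_head,
          List.erase_eq_eraseIdx_of_idxOf rfl, List.eraseIdx_eq_take_drop_succ]
      simp
    · have hp1 : (c :: e').idxOf a = e'.idxOf a + 1 := List.idxOf_cons_ne _ hca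
      have hcb : c ≠ b := by
        intro h
        rw [h, List.idxOf_cons_self] at hpq
        omega
      have hq1 : (c :: e').idxOf b = e'.idxOf b + 1 := List.idxOf_cons_ne _ hcb
      have hb' : b ∈ e' := by
        rcases List.mem_cons.mp hb with h | h
        · exact absurd h.symm hcb
        · exact h
      rw [hp1, hq1] at hpq ⊢
      have harith : e'.idxOf b + 1 - (e'.idxOf a + 1 + 1) = e'.idxOf b - (e'.idxOf a + 1) := by
        omega
      rw [List.erase_cons_tail (by simpa using hca),
          List.erase_cons_tail (by simpa using hcb),
          List.take_succ_cons, List.drop_succ_cons, List.drop_succ_cons, harith,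
          ih hb' (by omega)]
      simp

-- ===== VERDICT (by name: the statement is the Claim_ definition above) =====
theorem deledge_main : ∀ (g : List (List (Int × Int))) (x : Int) (y : Int),
    deledge g x y = deledge_alt g x y := by
  intro g x y
  unfold deledge deledge_alt
  by_cases hxy : x = y
  · simp [hxy]
  · rw [if_pos hxy, if_neg hxy]
    set e : List (Int × Int) := (PySem.List.pyGet? g 1).getD [] with he
    have h1 := deledgeLoop_spec e (x, y) 0 (Nat.zero_le _)
    have h2 := deledgeLoop_spec e (y, x) 0 (Nat.zero_le _)
    simp only [List.drop_zero, Nat.zero_add] at h1 h2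
    by_cases hm1 : (x, y) ∈ e
    · by_cases hm2 : (y, x) ∈ e
      · rw [if_pos hm1] at h1
        rw [if_pos hm2] at h2
        simp only [h1, h2]
        have hne : ((x, y) : Int × Int) ≠ (y, x) := fun h => hxy (congrArg Prod.fst h)
        have hm2' : (y, x) ∈ e.erase (x, y) := (List.mem_erase_of_ne (Ne.symm hne)).mpr hm2
        rw [if_pos (show (x, y) ∈ e ∧ (y, x) ∈ e from ⟨hm1, hm2⟩),
            PySem.List.remove?_eq_some_erase e _ hm1, Option.getD_some,
            PySem.List.remove?_eq_some_erase _ _ hm2', Option.getD_some]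
        rw [if_neg (show ¬¬(True ∧ True) by simp)]
        have hpq : List.idxOf (x, y) e ≠ List.idxOf (y, x) e := by
          intro h
          apply hne
          calc (x, y) = e[List.idxOf (x, y) e]'(List.idxOf_lt_length_of_mem hm1) :=
                (List.getElem_idxOf (List.idxOf_lt_length_of_mem hm1)).symm
            _ = e[List.idxOf (y, x) e]'(List.idxOf_lt_length_of_mem hm2) := by congr 1
            _ = (y, x) := List.getElem_idxOf (List.idxOf_lt_length_of_mem hm2)
        have c1 : ∀ n : Nat, ((n + 1 : Nat) : Int) - 1 = ((n : Nat) : Int) := by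
          intro n; push_cast; ring
        by_cases hlt : List.idxOf (x, y) e < List.idxOf (y, x) e
        · rw [if_pos (by exact_mod_cast Nat.succ_lt_succ hlt), c1, c1,
              PySem.List.slice_to_natCast, PySem.List.slice_natCast,
              PySem.List.slice_from_natCast,
              erase_erase_eq (x, y) (y, x) hne e hm2 hlt]
        · have hqp : List.idxOf (y, x) e < List.idxOf (x, y) e := by omega
          rw [if_neg (fun h => absurd
                (by exact_mod_cast h : List.idxOf (x, y) e + 1 < List.idxOf (y, x) e + 1)
                (by omega)),
              c1, c1, PySem.List.slice_to_natCast, PySem.List.slice_natCast,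
              PySem.List.slice_from_natCast, List.erase_comm,
              erase_erase_eq (y, x) (x, y) (Ne.symm hne) e hm1 hqp]
      · rw [if_pos hm1] at h1
        rw [if_neg hm2] at h2
        simp only [h1, h2]
        rw [if_pos (show ¬(True ∧ false = true) by simp),
            if_neg (fun hc : (x, y) ∈ e ∧ (y, x) ∈ e => hm2 hc.2)]
    · rw [if_neg hm1] at h1
      simp only [h1]
      rw [if_pos (show ¬(false = true ∧ (deledgeLoop e (y, x) false 0).1 = true) by simp),
          if_neg (fun hc : (x, y) ∈ e ∧ (y, x) ∈ e => hm1 hc.1)]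

theorem deledge_spec : Claim_equal_deledge := by
  intro g x y _ _
  exact deledge_main g x y
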